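-- pv_equiv track=rewrite | github.com/KIAND-glitch/COMP10001-Project2 | Project2.py | card_value
-- ===== SOURCE A (Python) =====
-- def card_value(cards):
--     '''takes a card(string) as an argument and returns its value as an integer'''
--     if not cards:
--         return None
--
--     for i in cards:
--         if cards[0] in 'AJQK':
--             if cards[0] == 'A':
--                 value = 1
--             elif cards[0] == 'J':
--                 value = 11
--             elif cards[0] == 'Q':
--                 value = 12
--             else:
--                 value = 13
--         elif cards[0] in '23456789':
--             value = int(cards[0])
--         elif cards[0] == '0':
--             value =10
--         else:
--             value = 0
--     return int(value)
-- ===== SOURCE B (Python) =====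
-- def card_value(cards):
--     '''takes a card(string) as an argument and returns its value as an integer'''
--     if not cards:
--         return None
--     return 'A234567890JQK'.find(cards[0]) + 1
-- ===== Notes on version B (the rewrite author's own statement) =====
-- stated objective: idiomatic
-- what changed: Replaced the loop over the whole string and the 13-way if/elif cascade with a single positional lookup of the first character in a rank string (position + 1 is the value; an absent character yields find's -1 and hence 0, matching A's else branch).
import Mathlib
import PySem

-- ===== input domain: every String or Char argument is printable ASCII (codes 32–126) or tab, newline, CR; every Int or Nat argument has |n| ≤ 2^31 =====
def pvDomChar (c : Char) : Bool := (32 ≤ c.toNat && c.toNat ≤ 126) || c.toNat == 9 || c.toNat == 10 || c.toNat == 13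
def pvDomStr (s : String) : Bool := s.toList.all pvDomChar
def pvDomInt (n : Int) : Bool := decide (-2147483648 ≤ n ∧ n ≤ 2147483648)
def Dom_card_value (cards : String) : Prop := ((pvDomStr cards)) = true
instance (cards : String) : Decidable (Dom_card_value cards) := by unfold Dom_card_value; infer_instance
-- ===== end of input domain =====

-- B replaces A's redundant loop and if/elif cascade with a positional lookup in the rank string 'A234567890JQK' (idiomatic).


-- ===== PORT A =====
-- body of A's loop: recomputes value from cards[0] on every iteration
def cardValueBody (c0 : Char) : Int :=
  if PySem.Str.isIn (String.ofList [c0]) "AJQK" then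
    if c0 = 'A' then 1
    else if c0 = 'J' then 11
    else if c0 = 'Q' then 12
    else 13
  else if PySem.Str.isIn (String.ofList [c0]) "23456789" then
    (PySem.Int.ofStr? (String.ofList [c0])).getD 0  -- int(cards[0]); always a digit on this branch, so ofStr? succeeds
  else if c0 = '0' then 10
  else 0

def card_value (cards : String) : Option Int :=
  match cards.toList with
  | [] => none
  | c0 :: rest =>
    -- 'for i in cards:' assigns value on every iteration; the initial 0 is never observed (list nonempty)
    some ((c0 :: rest).foldl (fun _ _ => cardValueBody c0) 0)

-- ===== PORT B =====
def card_value_alt (cards : String) : Option Int :=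
  match cards.toList with
  | [] => none
  | c0 :: _ => some (PySem.Str.find "A234567890JQK" (String.ofList [c0]) + 1)

-- ===== PRECONDITION & SPEC =====
def Spec_card_value (cards : String) (out : Option Int) : Prop := out = card_value_alt cards
instance (cards : String) (out : Option Int) : Decidable (Spec_card_value cards out) := by unfold Spec_card_value; infer_instance

-- ===== CLAIM (what is proved, stated in full; the proofs are below) =====
def Claim_equal_card_value : Prop := ∀ (cards : String), Dom_card_value cards → Spec_card_value cards (card_value cards)

-- ===== LEMMAS AND PROOFS =====
theorem foldl_const {α β : Type} (b : β) (l : List α) (i : β) (h : l ≠ []) :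
    List.foldl (fun _ _ => b) i l = b := by
  induction l generalizing i with
  | nil => exact absurd rfl h
  | cons c t ih =>
    cases t with
    | nil => rfl
    | cons d t' => exact ih b (by simp)

theorem body_eq_find (c0 : Char) :
    cardValueBody c0 = PySem.Str.find "A234567890JQK" (String.ofList [c0]) + 1 := by
  by_cases hA : c0 = 'A'; · subst hA; decide
  by_cases hJ : c0 = 'J'; · subst hJ; decide
  by_cases hQ : c0 = 'Q'; · subst hQ; decide
  by_cases hK : c0 = 'K'; · subst hK; decide
  by_cases h2 : c0 = '2'; · subst h2; decide
  by_cases h3 : c0 = '3'; · subst h3; decide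
  by_cases h4 : c0 = '4'; · subst h4; decide
  by_cases h5 : c0 = '5'; · subst h5; decide
  by_cases h6 : c0 = '6'; · subst h6; decide
  by_cases h7 : c0 = '7'; · subst h7; decide
  by_cases h8 : c0 = '8'; · subst h8; decide
  by_cases h9 : c0 = '9'; · subst h9; decide
  by_cases h0 : c0 = '0'; · subst h0; decide
  -- c0 is none of the 13 rank characters: A's cascade gives 0, B's find gives -1
  have hin1 : PySem.Chars.isIn [c0] ['A', 'J', 'Q', 'K'] = false := by
    rw [PySem.Chars.isIn_eq_false_iff]
    intro h
    have := h.subset (by simp : c0 ∈ [c0])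
    simp_all
  have hin2 : PySem.Chars.isIn [c0] ['2', '3', '4', '5', '6', '7', '8', '9'] = false := by
    rw [PySem.Chars.isIn_eq_false_iff]
    intro h
    have := h.subset (by simp : c0 ∈ [c0])
    simp_all
  have hfind : PySem.Chars.find ['A', '2', '3', '4', '5', '6', '7', '8', '9', '0', 'J', 'Q', 'K'] [c0] = -1 := by
    rw [PySem.Chars.find_eq_neg_one_iff]
    intro h
    have := h.subset (by simp : c0 ∈ [c0])
    simp_all
  simp [cardValueBody, hin1, hin2, h0, hfind]

-- ===== VERDICT (by name: the statement is the Claim_ definition above) =====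
theorem card_value_spec : Claim_equal_card_value := by
  intro cards _
  unfold Spec_card_value card_value card_value_alt
  cases h : cards.toList with
  | nil => rfl
  | cons c0 rest =>
    show some (List.foldl (fun _ _ => cardValueBody c0) 0 (c0 :: rest)) =
        some (PySem.Str.find "A234567890JQK" (String.ofList [c0]) + 1)
    rw [foldl_const (cardValueBody c0) (c0 :: rest) (0 : Int) (by simp), body_eq_find]
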